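-- pv_equiv track=rewrite | github.com/Sam-no1/Portfolio_python | word_search.py | occurs_in
-- ===== SOURCE A (Python) =====
-- def occurs_in(substr, word_list):
--     """
--     iterates through the provided string and sends the word found in the list
--     Parameters: words stores the words found when compairing it with the word_list
--     Returns: a list of strings that has checked words
--     """
--     words = []
--     length = len(substr)
--     for i in range(length):
--         for j in range(i + 3, length + 1):
--             sub = substr[i:j]
--             if sub in word_list:
--                 words.append(sub)
--
--     r_substr = substr[::-1]
--     for i in range(len(r_substr)):
--         for j in range(i + 3, len(r_substr) + 1):
--             sub = r_substr[i:j]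
--             if sub in word_list:
--                 words.append(sub)
--     return words
-- ===== SOURCE B (Python) =====
-- def occurs_in(substr, word_list):
--     # candidate words: distinct, at least 3 chars, ordered by increasing length
--     cands = [w for w in sorted(dict.fromkeys(word_list), key=len) if len(w) >= 3]
--     out = []
--     for s in (substr, substr[::-1]):
--         for i in range(len(s)):
--             for w in cands:
--                 if s[i:i + len(w)] == w:
--                     out.append(w)
--     return out
-- ===== Notes on version B (the rewrite author's own statement) =====
-- stated objective: faster
-- what changed: Instead of testing every substring end position j for membership in word_list (O(n) end positions per start, each with a list-membership scan, for both the string and its reverse), B builds once a deduplicated candidate list of words of length >= 3 sorted by length, and at each start position appends the candidates that match the text there; at most one candidate per length can match, so the per-position increasing-length order and multiplicity are preserved.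
import Mathlib
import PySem

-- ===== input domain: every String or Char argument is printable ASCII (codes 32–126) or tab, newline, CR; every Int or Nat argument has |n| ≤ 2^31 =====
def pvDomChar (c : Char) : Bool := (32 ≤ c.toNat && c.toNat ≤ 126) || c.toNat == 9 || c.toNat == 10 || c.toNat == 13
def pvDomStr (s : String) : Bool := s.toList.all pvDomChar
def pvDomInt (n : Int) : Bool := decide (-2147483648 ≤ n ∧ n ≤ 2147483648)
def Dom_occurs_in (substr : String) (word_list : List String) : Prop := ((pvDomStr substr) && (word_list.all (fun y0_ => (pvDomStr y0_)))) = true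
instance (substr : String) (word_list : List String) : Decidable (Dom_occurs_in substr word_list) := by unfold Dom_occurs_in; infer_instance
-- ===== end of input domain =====

-- B scans a deduplicated, length-sorted candidate word list at each start position (faster: one candidate scan per start position)
-- instead of testing every substring end position for list membership (objective: alternative).

-- ===== PORT A =====
def occurs_in (substr : String) (word_list : List String) : List String :=
  let length := PySem.Str.len substr
  let words :=
    (PySem.List.pyRange 0 length 1).foldl (fun acc i =>
      (PySem.List.pyRange (i + 3) (length + 1) 1).foldl (fun acc j =>
        if PySem.Str.slice substr (some i) (some j) ∈ word_list then
          acc ++ [PySem.Str.slice substr (some i) (some j)]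
        else acc) acc) []
  let r_substr := (PySem.Str.slice? substr none none (-1)).getD ""
  (PySem.List.pyRange 0 (PySem.Str.len r_substr) 1).foldl (fun acc i =>
    (PySem.List.pyRange (i + 3) (PySem.Str.len r_substr + 1) 1).foldl (fun acc j =>
      if PySem.Str.slice r_substr (some i) (some j) ∈ word_list then
        acc ++ [PySem.Str.slice r_substr (some i) (some j)]
      else acc) acc) words

-- ===== PORT B =====
def occurs_in_alt (substr : String) (word_list : List String) : List String :=
  let cands :=
    (PySem.List.sorted (PySem.List.dedup word_list) (fun w => PySem.Str.len w)).filter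
      (fun w => decide (3 ≤ PySem.Str.len w))
  [substr, (PySem.Str.slice? substr none none (-1)).getD ""].foldl (fun out s =>
    (PySem.List.pyRange 0 (PySem.Str.len s) 1).foldl (fun acc i =>
      cands.foldl (fun acc w =>
        if PySem.Str.slice s (some i) (some (i + PySem.Str.len w)) = w then acc ++ [w]
        else acc) acc) out) []

-- ===== PRECONDITION & SPEC =====
def Spec_occurs_in (substr : String) (word_list : List String) (out : List String) : Prop := out = occurs_in_alt substr word_list
instance (substr : String) (word_list : List String) (out : List String) : Decidable (Spec_occurs_in substr word_list out) := by unfold Spec_occurs_in; infer_instance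

-- ===== CLAIM (what is proved, stated in full; the proofs are below) =====
def Claim_equal_occurs_in : Prop := ∀ (substr : String) (word_list : List String), Dom_occurs_in substr word_list → Spec_occurs_in substr word_list (occurs_in substr word_list)

-- ===== LEMMAS AND PROOFS =====

-- the candidate list of B, named for the proofs
def pvCands (word_list : List String) : List String :=
  (PySem.List.sorted (PySem.List.dedup word_list) (fun w => PySem.Str.len w)).filter
    (fun w => decide (3 ≤ PySem.Str.len w))

lemma pv_len_slice (s : String) (i j : Int) (hi : 0 ≤ i) (hij : i ≤ j)
    (hin : i ≤ PySem.Str.len s) :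
    PySem.Str.len (PySem.Str.slice s (some i) (some j)) = min j (PySem.Str.len s) - i := by
  rw [PySem.Str.len_eq, PySem.Str.len_eq] at *
  rw [PySem.Str.toList_slice]
  simp only [PySem.Chars.slice_eq_listSlice]
  rw [PySem.List.slice_toNat _ hi (by omega)]
  simp only [List.length_take, List.length_drop]
  omega

lemma pv_mem_iff (word_list : List String) (s : String) (i : Int) (hi : 0 ≤ i)
    (hin : i ≤ PySem.Str.len s) (x : String) :
    x ∈ ((PySem.List.pyRange (i + 3) (PySem.Str.len s + 1) 1).filter
          (fun j => decide (PySem.Str.slice s (some i) (some j) ∈ word_list))).map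
          (fun j => PySem.Str.slice s (some i) (some j))
      ↔ x ∈ (pvCands word_list).filter
          (fun w => decide (PySem.Str.slice s (some i) (some (i + PySem.Str.len w)) = w)) := by
  simp only [List.mem_map, List.mem_filter, decide_eq_true_eq, pvCands,
    PySem.List.mem_sorted, PySem.List.mem_dedup, PySem.List.mem_pyRange_one]
  constructor
  · rintro ⟨j, ⟨hjr, hjw⟩, rfl⟩
    have hlen := pv_len_slice s i j hi (by omega) hin
    refine ⟨⟨hjw, by omega⟩, ?_⟩
    have hj : i + PySem.Str.len (PySem.Str.slice s (some i) (some j)) = j := by omega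
    rw [hj]
  · rintro ⟨⟨hw, h3⟩, hq⟩
    have h0 : (0 : Int) ≤ PySem.Str.len x := by
      rw [PySem.Str.len_eq]; exact Int.natCast_nonneg _
    have hsl := pv_len_slice s i (i + PySem.Str.len x) hi (by omega) hin
    rw [hq] at hsl
    exact ⟨i + PySem.Str.len x, ⟨⟨by omega, by omega⟩, by rw [hq]; exact hw⟩, hq⟩

lemma pv_inner_eq (word_list : List String) (s : String) (i : Int) (hi : 0 ≤ i)
    (hin : i ≤ PySem.Str.len s) :
    ((PySem.List.pyRange (i + 3) (PySem.Str.len s + 1) 1).filter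
        (fun j => decide (PySem.Str.slice s (some i) (some j) ∈ word_list))).map
        (fun j => PySem.Str.slice s (some i) (some j))
      = (pvCands word_list).filter
        (fun w => decide (PySem.Str.slice s (some i) (some (i + PySem.Str.len w)) = w)) := by
  have hL : (((PySem.List.pyRange (i + 3) (PySem.Str.len s + 1) 1).filter
        (fun j => decide (PySem.Str.slice s (some i) (some j) ∈ word_list))).map
        (fun j => PySem.Str.slice s (some i) (some j))).Pairwise
        (fun a b => PySem.Str.len a < PySem.Str.len b) := by
    rw [List.pairwise_map]
    refine List.Pairwise.imp_of_mem ?_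
      ((PySem.List.pairwise_lt_pyRange_one (i + 3) (PySem.Str.len s + 1)).filter _)
    intro a b ha hb hab
    rw [List.mem_filter, PySem.List.mem_pyRange_one] at ha hb
    have h1 := pv_len_slice s i a hi (by omega) hin
    have h2 := pv_len_slice s i b hi (by omega) hin
    omega
  have hcnd : (pvCands word_list).Nodup := by
    refine List.Nodup.filter _ ?_
    exact ((PySem.List.sorted_perm (PySem.List.dedup word_list)
      (fun w => PySem.Str.len w) false).nodup_iff).mpr (PySem.List.nodup_dedup word_list)
  have hR : ((pvCands word_list).filter
        (fun w => decide (PySem.Str.slice s (some i) (some (i + PySem.Str.len w)) = w))).Pairwise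
        (fun a b => PySem.Str.len a < PySem.Str.len b) := by
    have hle : ((pvCands word_list).filter
        (fun w => decide (PySem.Str.slice s (some i) (some (i + PySem.Str.len w)) = w))).Pairwise
        (fun a b => PySem.Str.len a ≤ PySem.Str.len b ∧ a ≠ b) := by
      refine List.Pairwise.and ?_ (List.Nodup.filter _ hcnd)
      refine List.Pairwise.filter _ ?_
      refine List.Pairwise.filter _ ?_
      exact PySem.List.sorted_pairwise (PySem.List.dedup word_list) (fun w => PySem.Str.len w)
    refine List.Pairwise.imp_of_mem ?_ hle
    intro a b ha hb hab
    rw [List.mem_filter, decide_eq_true_eq] at ha hb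
    rcases lt_or_eq_of_le hab.1 with h | h
    · exact h
    · exfalso
      apply hab.2
      rw [← ha.2, ← hb.2, h]
  have hperm : (((PySem.List.pyRange (i + 3) (PySem.Str.len s + 1) 1).filter
        (fun j => decide (PySem.Str.slice s (some i) (some j) ∈ word_list))).map
        (fun j => PySem.Str.slice s (some i) (some j))).Perm
        ((pvCands word_list).filter
        (fun w => decide (PySem.Str.slice s (some i) (some (i + PySem.Str.len w)) = w))) := by
    rw [List.perm_ext_iff_of_nodup
      (hL.imp (fun h => by intro hh; rw [hh] at h; exact lt_irrefl _ h))
      (hR.imp (fun h => by intro hh; rw [hh] at h; exact lt_irrefl _ h))]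
    exact pv_mem_iff word_list s i hi hin
  have h1 := PySem.List.sorted_eq_of_perm_of_pairwise_lt _ _
    (fun w => PySem.Str.len w) hperm hL
  have h2 := PySem.List.sorted_eq_self_of_pairwise _ (fun w => PySem.Str.len w)
    (hR.imp le_of_lt)
  rw [← h1, h2]

lemma pv_pass_eq (word_list : List String) (s : String) (acc : List String) :
    (PySem.List.pyRange 0 (PySem.Str.len s) 1).foldl (fun acc i =>
      (PySem.List.pyRange (i + 3) (PySem.Str.len s + 1) 1).foldl (fun acc j =>
        if PySem.Str.slice s (some i) (some j) ∈ word_list then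
          acc ++ [PySem.Str.slice s (some i) (some j)]
        else acc) acc) acc
    = (PySem.List.pyRange 0 (PySem.Str.len s) 1).foldl (fun acc i =>
      (pvCands word_list).foldl (fun acc w =>
        if PySem.Str.slice s (some i) (some (i + PySem.Str.len w)) = w then acc ++ [w]
        else acc) acc) acc := by
  apply PySem.List.foldl_congr_mem
  intro acc2 i hi
  rw [PySem.List.mem_pyRange_one] at hi
  rw [PySem.List.foldl_append_ite (p := fun j => PySem.Str.slice s (some i) (some j) ∈ word_list)
        (f := fun j => PySem.Str.slice s (some i) (some j)),
      PySem.List.foldl_append_ite_eq_filter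
        (p := fun w => PySem.Str.slice s (some i) (some (i + PySem.Str.len w)) = w)]
  congr 1
  exact pv_inner_eq word_list s i hi.1 (le_of_lt hi.2)

-- ===== VERDICT (by name: the statement is the Claim_ definition above) =====
theorem occurs_in_spec : Claim_equal_occurs_in := by
  intro substr word_list _
  unfold Spec_occurs_in occurs_in occurs_in_alt
  simp only [List.foldl]
  rw [pv_pass_eq word_list substr, pv_pass_eq word_list]
  rfl
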